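-- pv_equiv track=rewrite | github.com/stevewoz1234567890/AI-Translation | test.py | insert_es_into_en
-- ===== SOURCE A (Python) =====
-- def insert_es_into_en(en_results, es_results_filtered):
--     """Insert Spanish results into English results."""
--     for es_key, es_en_val, es_es_val in es_results_filtered:
--         parent_key = es_key.rsplit('.', 1)[0]
--         for index, (en_key, _, _) in enumerate(en_results):
--             if parent_key == en_key.rsplit('.', 1)[0]:
--                 en_results.insert(index + 1, (es_key, es_en_val, es_es_val))
--                 break
--         else:
--             en_results.append((es_key, es_en_val, es_es_val))
--     return en_results
-- ===== SOURCE B (Python) =====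
-- def insert_es_into_en(en_results, es_results_filtered):
--     """Insert Spanish results into English results."""
--     def parent(key):
--         return key.rsplit('.', 1)[0]
--     # pending[p]: entries to emit right after parent p's anchor entry, newest first
--     # (each new entry is inserted directly after the anchor, so it precedes older ones)
--     pending = {}
--     tail = []  # entries whose parent has no anchor: they go to the end and become anchors
--     for key, _, _ in en_results:
--         pending.setdefault(parent(key), [])
--     for item in es_results_filtered:
--         p = parent(item[0])
--         if p in pending:
--             pending[p].insert(0, item)
--         else:
--             tail.append(item)
--             pending[p] = []
--     out = []
--     for item in en_results + tail:
--         out.append(item)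
--         out.extend(pending.pop(parent(item[0]), []))
--     en_results[:] = out
--     return en_results
-- ===== Notes on version B (the rewrite author's own statement) =====
-- stated objective: alternative
-- what changed: B replaces A's per-entry rescan of the growing result list by a parent-key -> pending-entries dict built in one pass (each Spanish entry filed directly after its anchor, newest first) plus a single emission sweep, so no inner scan over en_results remains.
import Mathlib
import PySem

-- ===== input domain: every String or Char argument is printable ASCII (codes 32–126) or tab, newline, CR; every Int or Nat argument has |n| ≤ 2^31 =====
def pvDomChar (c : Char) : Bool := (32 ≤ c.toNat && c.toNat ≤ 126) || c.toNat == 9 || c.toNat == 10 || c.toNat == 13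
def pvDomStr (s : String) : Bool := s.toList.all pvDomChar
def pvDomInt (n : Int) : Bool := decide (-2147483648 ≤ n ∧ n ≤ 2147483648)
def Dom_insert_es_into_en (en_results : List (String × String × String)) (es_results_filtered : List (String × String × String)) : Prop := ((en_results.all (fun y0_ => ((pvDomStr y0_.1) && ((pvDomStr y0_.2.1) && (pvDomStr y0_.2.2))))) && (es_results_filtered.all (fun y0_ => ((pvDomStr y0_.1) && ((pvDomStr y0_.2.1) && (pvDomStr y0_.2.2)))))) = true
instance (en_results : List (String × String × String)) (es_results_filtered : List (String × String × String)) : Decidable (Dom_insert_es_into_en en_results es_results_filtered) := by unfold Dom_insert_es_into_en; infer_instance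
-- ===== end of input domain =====

-- B replaces A's rescan-and-insert loop by a parent-key -> pending-entries index built in
-- one pass (each Spanish entry is filed directly after its anchor, newest first) and a
-- single emission sweep (objective: alternative).  Both A and B mutate en_results in place
-- (en_results[:] = out in B); the equivalence proved here is about the returned value.

-- key.rsplit('.', 1)[0]  (ported by hand over List Char; exact: the prefix of the string
-- before its LAST '.', or the whole string if it contains no '.')
def pvParent (s : String) : String :=
  match s.toList.reverse.dropWhile (fun c => c ≠ '.') with
  | [] => s
  | _ :: rest => String.ofList rest.reverse

-- ===== PORT A =====
-- inner loop 'for index, (en_key, _, _) in enumerate(en_results): … insert(index+1, item); break / else: append'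
def pvScanInsert (parent_key : String) (item : String × String × String) :
    List (String × String × String) → List (String × String × String)
  | [] => [item]
  | x :: rest =>
      if parent_key == pvParent x.1 then x :: item :: rest
      else x :: pvScanInsert parent_key item rest
def insert_es_into_en (en_results : List (String × String × String)) (es_results_filtered : List (String × String × String)) : List (String × String × String) :=
  es_results_filtered.foldl (fun acc it => pvScanInsert (pvParent it.1) it acc) en_results

-- ===== PORT B =====
-- pending = {} / tail = [] / the three loops of Source B, state threaded through foldl
def insert_es_into_en_alt (en_results : List (String × String × String)) (es_results_filtered : List (String × String × String)) : List (String × String × String) :=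
  let pending0 := en_results.foldl (fun d x => d.setdefault (pvParent x.1) []) PySem.Dict.empty
  let st := es_results_filtered.foldl
    (fun (st : PySem.Dict String (List (String × String × String)) × List (String × String × String)) item =>
      if st.1.contains (pvParent item.1) then
        (st.1.modify (pvParent item.1) [] (fun g => PySem.List.insert g 0 item), st.2)
      else
        (st.1.insert (pvParent item.1) [], st.2 ++ [item])) (pending0, [])
  let st2 := (en_results ++ st.2).foldl
    (fun (acc : List (String × String × String) × PySem.Dict String (List (String × String × String))) item =>
      match acc.2.pop? (pvParent item.1) with
      | some (g, d') => (acc.1 ++ item :: g, d')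
      | none => (acc.1 ++ [item], acc.2)) ([], st.1)
  st2.1


-- ===== PRECONDITION & SPEC =====
def Spec_insert_es_into_en (en_results : List (String × String × String)) (es_results_filtered : List (String × String × String)) (out : List (String × String × String)) : Prop := out = insert_es_into_en_alt en_results es_results_filtered
instance (en_results : List (String × String × String)) (es_results_filtered : List (String × String × String)) (out : List (String × String × String)) : Decidable (Spec_insert_es_into_en en_results es_results_filtered out) := by unfold Spec_insert_es_into_en; infer_instance

-- ===== CLAIM =====
def Claim_equal_insert_es_into_en : Prop := ∀ (en_results : List (String × String × String)) (es_results_filtered : List (String × String × String)), Dom_insert_es_into_en en_results es_results_filtered → Spec_insert_es_into_en en_results es_results_filtered (insert_es_into_en en_results es_results_filtered)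

-- ===== LEMMAS AND PROOFS =====
def pvPar (x : String × String × String) : String := pvParent x.1

-- A's output, characterised: each entry is followed by the REVERSE of its same-parent
-- Spanish group (at the first entry of that parent only); Spanish entries with no anchor
-- open their own group at the end, head first.
def pvUnanch : List (String × String × String) → List (String × String × String)
  | [] => []
  | d :: dt =>
      d :: (dt.filter (fun y => pvPar y == pvPar d)).reverse
        ++ pvUnanch (dt.filter (fun y => !(pvPar y == pvPar d)))
  termination_by l => l.length
  decreasing_by simp only [List.length_unattach]; exact Nat.lt_succ_of_le (le_trans (List.length_filter_le _ _) (by simp))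

def pvCore : List (String × String × String) → List (String × String × String) → List (String × String × String)
  | [], done => pvUnanch done
  | x :: r, done =>
      x :: (done.filter (fun y => pvPar y == pvPar x)).reverse
        ++ pvCore r (done.filter (fun y => !(pvPar y == pvPar x)))

theorem pvUnanch_nil : pvUnanch [] = [] := by rw [pvUnanch.eq_def]

theorem pvUnanch_cons (d : String × String × String) (dt : List (String × String × String)) :
    pvUnanch (d :: dt) =
      d :: (dt.filter (fun y => pvPar y == pvPar d)).reverse
        ++ pvUnanch (dt.filter (fun y => !(pvPar y == pvPar d))) := by
  rw [pvUnanch.eq_def]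

theorem pvScan_append_left (p : String) (e : String × String × String)
    (u v : List (String × String × String)) (h : ∀ x ∈ u, pvPar x ≠ p) :
    pvScanInsert p e (u ++ v) = u ++ pvScanInsert p e v := by
  induction u with
  | nil => rfl
  | cons x tl ih =>
      have hx : (p == pvParent x.1) = false := by
        have hx' := h x (by simp)
        exact beq_eq_false_iff_ne.mpr (fun hh => hx' (by simp [pvPar, hh]))
      simp only [List.cons_append, pvScanInsert, hx, Bool.false_eq_true, if_false]
      rw [ih (fun y hy => h y (List.mem_cons_of_mem _ hy))]

theorem pvScan_unanch (p : String) (e : String × String × String) (hp : pvPar e = p) :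
    ∀ done : List (String × String × String),
      pvScanInsert p e (pvUnanch done) = pvUnanch (done ++ [e]) := by
  intro done
  induction hn : done.length using Nat.strong_induction_on generalizing done with
  | _ n ih =>
  match done with
  | [] => subst hp; simp [pvUnanch_nil, pvUnanch_cons, pvScanInsert, pvPar]
  | d :: dt =>
    rw [pvUnanch_cons]
    simp only [List.cons_append]
    by_cases hpd : pvPar d = p
    · -- head matches
      have hb : (p == pvParent d.1) = true := by
        simp [pvPar] at hpd; simp [hpd]
      simp only [pvScanInsert, hb, if_true]
      rw [pvUnanch_cons]
      simp only [List.cons_append]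
      have h1 : (dt ++ [e]).filter (fun y => pvPar y == pvPar d) =
          dt.filter (fun y => pvPar y == pvPar d) ++ [e] := by
        simp [List.filter_append, hpd, hp]
      have h2 : (dt ++ [e]).filter (fun y => !(pvPar y == pvPar d)) =
          dt.filter (fun y => !(pvPar y == pvPar d)) := by
        simp [List.filter_append, hpd, hp]
      rw [h1, h2]
      simp
    · -- head does not match: skip the whole block
      have hblk : ∀ x ∈ d :: (dt.filter (fun y => pvPar y == pvPar d)).reverse, pvPar x ≠ p := by
        intro x hx
        rcases List.mem_cons.mp hx with h | h
        · subst h; exact hpd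
        · have := List.mem_reverse.mp h
          have := (List.mem_filter.mp this).2
          have : pvPar x = pvPar d := by simpa using this
          rw [this]; exact hpd
      have := pvScan_append_left p e (d :: (dt.filter (fun y => pvPar y == pvPar d)).reverse)
          (pvUnanch (dt.filter (fun y => !(pvPar y == pvPar d)))) hblk
      simp only [List.cons_append] at this ⊢
      rw [this]
      have hrec := ih (dt.filter (fun y => !(pvPar y == pvPar d))).length
        (by subst hn; exact Nat.lt_succ_of_le (List.length_filter_le _ _))
        (dt.filter (fun y => !(pvPar y == pvPar d))) rfl
      rw [hrec, pvUnanch_cons]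
      simp only [List.cons_append]
      have hne : (pvPar e == pvPar d) = false :=
        beq_eq_false_iff_ne.mpr (fun hh => hpd (hp ▸ hh.symm))
      have h1 : (dt ++ [e]).filter (fun y => pvPar y == pvPar d) =
          dt.filter (fun y => pvPar y == pvPar d) := by
        simp [List.filter_append, hne]
      have h2 : (dt ++ [e]).filter (fun y => !(pvPar y == pvPar d)) =
          dt.filter (fun y => !(pvPar y == pvPar d)) ++ [e] := by
        simp [List.filter_append, hne]
      rw [h1, h2]

theorem pvScan_core (p : String) (e : String × String × String) (hp : pvPar e = p) :
    ∀ (en done : List (String × String × String)),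
      pvScanInsert p e (pvCore en done) = pvCore en (done ++ [e]) := by
  intro en
  induction en with
  | nil => intro done; exact pvScan_unanch p e hp done
  | cons x r ih =>
    intro done
    rw [pvCore]
    simp only [List.cons_append]
    by_cases hpx : pvPar x = p
    · have hb : (p == pvParent x.1) = true := by simp [pvPar] at hpx; simp [hpx]
      simp only [pvScanInsert, hb, if_true]
      rw [pvCore]
      simp only [List.cons_append]
      have h1 : (done ++ [e]).filter (fun y => pvPar y == pvPar x) =
          done.filter (fun y => pvPar y == pvPar x) ++ [e] := by
        simp [List.filter_append, hpx, hp]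
      have h2 : (done ++ [e]).filter (fun y => !(pvPar y == pvPar x)) =
          done.filter (fun y => !(pvPar y == pvPar x)) := by
        simp [List.filter_append, hpx, hp]
      rw [h1, h2]; simp
    · have hblk : ∀ y ∈ x :: (done.filter (fun z => pvPar z == pvPar x)).reverse, pvPar y ≠ p := by
        intro y hy
        rcases List.mem_cons.mp hy with h | h
        · subst h; exact hpx
        · have := (List.mem_filter.mp (List.mem_reverse.mp h)).2
          have : pvPar y = pvPar x := by simpa using this
          rw [this]; exact hpx
      have hs := pvScan_append_left p e (x :: (done.filter (fun z => pvPar z == pvPar x)).reverse)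
          (pvCore r (done.filter (fun z => !(pvPar z == pvPar x)))) hblk
      simp only [List.cons_append] at hs ⊢
      rw [hs, ih]
      rw [pvCore]
      simp only [List.cons_append]
      have hne : (pvPar e == pvPar x) = false :=
        beq_eq_false_iff_ne.mpr (fun hh => hpx (hp ▸ hh.symm))
      have h1 : (done ++ [e]).filter (fun y => pvPar y == pvPar x) =
          done.filter (fun y => pvPar y == pvPar x) := by
        simp [List.filter_append, hne]
      have h2 : (done ++ [e]).filter (fun y => !(pvPar y == pvPar x)) =
          done.filter (fun y => !(pvPar y == pvPar x)) ++ [e] := by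
        simp [List.filter_append, hne]
      rw [h1, h2]

theorem insert_es_into_en_eq_core (en es : List (String × String × String)) :
    insert_es_into_en en es = pvCore en es := by
  induction es using List.reverseRecOn with
  | nil =>
    unfold insert_es_into_en
    simp only [List.foldl_nil]
    induction en with
    | nil => rw [pvCore, pvUnanch_nil]
    | cons x r ih =>
      rw [pvCore]
      simp only [List.filter_nil, List.reverse_nil, List.cons_append, List.nil_append]
      rw [← ih]
  | append_singleton es e ih =>
    unfold insert_es_into_en at ih ⊢
    rw [List.foldl_append]
    simp only [List.foldl_cons, List.foldl_nil]
    rw [ih]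
    exact pvScan_core (pvPar e) e rfl en es

-- first entry of each parent group, in order
def pvHeads : List (String × String × String) → List (String × String × String)
  | [] => []
  | d :: dt => d :: pvHeads (dt.filter (fun y => !(pvPar y == pvPar d)))
  termination_by l => l.length
  decreasing_by simp only [List.length_unattach]; exact Nat.lt_succ_of_le (le_trans (List.length_filter_le _ _) (by simp))
theorem pvHeads_nil : pvHeads [] = [] := by rw [pvHeads.eq_def]
theorem pvHeads_cons (d : String × String × String) (dt : List (String × String × String)) :
    pvHeads (d :: dt) = d :: pvHeads (dt.filter (fun y => !(pvPar y == pvPar d))) := by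
  rw [pvHeads.eq_def]

-- named forms of B's three loop bodies (definitionally the port's lambdas)
def pvStep2
    (st : PySem.Dict String (List (String × String × String)) × List (String × String × String))
    (item : String × String × String) :
    PySem.Dict String (List (String × String × String)) × List (String × String × String) :=
  if st.1.contains (pvParent item.1) then
    (st.1.modify (pvParent item.1) [] (fun g => PySem.List.insert g 0 item), st.2)
  else
    (st.1.insert (pvParent item.1) [], st.2 ++ [item])
def pvStep3
    (acc : List (String × String × String) × PySem.Dict String (List (String × String × String)))
    (item : String × String × String) :
    List (String × String × String) × PySem.Dict String (List (String × String × String)) :=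
  match acc.2.pop? (pvParent item.1) with
  | some (g, d') => (acc.1 ++ item :: g, d')
  | none => (acc.1 ++ [item], acc.2)

def pvDict0 (ks : List String) : PySem.Dict String (List (String × String × String)) :=
  ks.foldl (fun d p => d.setdefault p []) PySem.Dict.empty
def pvPend (ks : List String) (u : List (String × String × String)) :
    PySem.Dict String (List (String × String × String)) :=
  (u.foldl (fun st item => pvStep2 st item) (pvDict0 ks, [])).1

theorem pvInsert0 (g : List (String × String × String)) (v : String × String × String) :
    PySem.List.insert g 0 v = v :: g := by
  simp [PySem.List.insert, PySem.List.sliceIndices]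

def pvTail2 (ks : List String) (u : List (String × String × String)) :
    List (String × String × String) :=
  (u.foldl (fun st item => pvStep2 st item) (pvDict0 ks, [])).2

theorem pvStep2_fst (st : PySem.Dict String (List (String × String × String)) × List (String × String × String))
    (item : String × String × String) : (pvStep2 st item).1 = (pvStep2 (st.1, []) item).1 := by
  unfold pvStep2
  by_cases h : st.1.contains (pvParent item.1) = true <;> simp [h]

theorem pvPend_append (ks : List String) (u : List (String × String × String))
    (e : String × String × String) :
    pvPend ks (u ++ [e]) = (pvStep2 (pvPend ks u, []) e).1 := by
  unfold pvPend
  rw [List.foldl_append]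
  simp only [List.foldl_cons, List.foldl_nil]
  rw [pvStep2_fst]

theorem pvTail2_append (ks : List String) (u : List (String × String × String))
    (e : String × String × String) :
    pvTail2 ks (u ++ [e])
      = pvTail2 ks u ++ (if (pvPend ks u).contains (pvParent e.1) then [] else [e]) := by
  unfold pvTail2 pvPend
  rw [List.foldl_append]
  simp only [List.foldl_cons, List.foldl_nil]
  set st := u.foldl (fun st item => pvStep2 st item) (pvDict0 ks, []) with hst
  by_cases h : st.1.contains (pvParent e.1) = true
  · have h1 : pvStep2 st e
        = (st.1.modify (pvParent e.1) [] (fun g => PySem.List.insert g 0 e), st.2) := by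
      unfold pvStep2; simp [h]
    rw [h1, if_pos h]
    simp
  · have h1 : pvStep2 st e = (st.1.insert (pvParent e.1) [], st.2 ++ [e]) := by
      unfold pvStep2; simp [h]
    rw [h1, if_neg h]

-- dict0 facts
theorem pvDict0_append (ks : List String) (p : String) :
    pvDict0 (ks ++ [p]) = (pvDict0 ks).setdefault p [] := by
  unfold pvDict0
  rw [List.foldl_append]
  rfl

theorem pvDict0_keys (ks : List String) : (pvDict0 ks).keys = PySem.Set.ofList ks := by
  induction ks using List.reverseRecOn with
  | nil => rfl
  | append_singleton ks p ih =>
    rw [pvDict0_append]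
    have hof : PySem.Set.ofList (ks ++ [p]) = PySem.Set.add (PySem.Set.ofList ks) p := by
      rw [PySem.Set.ofList_append, PySem.Set.update_cons, PySem.Set.update_nil]
    rw [hof]
    by_cases h : (pvDict0 ks).contains p = true
    · rw [PySem.Dict.setdefault_of_contains _ _ h, ih]
      unfold PySem.Set.add
      have : PySem.Set.contains (PySem.Set.ofList ks) p = true := by
        rw [← ih]
        simpa [PySem.Set.contains, List.contains_iff_mem, PySem.Dict.contains_iff_mem_keys] using h
      rw [if_pos this]
    · rw [PySem.Dict.setdefault_of_not_contains _ _ (by simpa using h),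
         PySem.Dict.keys_insert_of_not_contains _ _ (by simpa using h), ih]
      unfold PySem.Set.add
      have : ¬ PySem.Set.contains (PySem.Set.ofList ks) p = true := by
        rw [← ih]
        intro hc
        apply h
        simpa [PySem.Set.contains, List.contains_iff_mem, PySem.Dict.contains_iff_mem_keys] using hc
      rw [if_neg this]

theorem pvDict0_getD (ks : List String) (q : String) : (pvDict0 ks).getD q [] = [] := by
  induction ks using List.reverseRecOn with
  | nil => rfl
  | append_singleton ks p ih =>
    rw [pvDict0_append]
    by_cases h : (pvDict0 ks).contains p = true
    · rw [PySem.Dict.setdefault_of_contains _ _ h]; exact ih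
    · rw [PySem.Dict.setdefault_of_not_contains _ _ (by simpa using h), PySem.Dict.getD_insert]
      split_ifs with hq
      · rfl
      · exact ih

theorem set_mem_update (s : PySem.Set String) (l : List String) (q : String) :
    q ∈ PySem.Set.update s l ↔ q ∈ s ∨ q ∈ l := by
  have h : PySem.Set.update s l = l.foldl (fun s b => PySem.Set.add s (id b)) s := rfl
  rw [h, PySem.Set.mem_foldl_add]
  simp

theorem pvPend_keys (ks : List String) (u : List (String × String × String)) :
    (pvPend ks u).keys = PySem.Set.update (PySem.Set.ofList ks) (u.map pvPar) := by
  induction u using List.reverseRecOn with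
  | nil =>
    show (pvDict0 ks).keys = _
    rw [pvDict0_keys]
    simp [PySem.Set.update_nil]
  | append_singleton u e ih =>
    rw [pvPend_append]
    have hupd : PySem.Set.update (PySem.Set.ofList ks) ((u ++ [e]).map pvPar)
        = PySem.Set.add (PySem.Set.update (PySem.Set.ofList ks) (u.map pvPar)) (pvPar e) := by
      rw [List.map_append, PySem.Set.update_append, List.map_cons, List.map_nil,
          PySem.Set.update_cons, PySem.Set.update_nil]
    rw [hupd, ← ih]
    by_cases h : (pvPend ks u).contains (pvParent e.1) = true
    · have h1 : (pvStep2 (pvPend ks u, []) e).1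
          = (pvPend ks u).modify (pvParent e.1) [] (fun g => PySem.List.insert g 0 e) := by
        unfold pvStep2; simp [h]
      rw [h1, PySem.Dict.keys_modify, PySem.Dict.keys_insert_of_contains _ _ h]
      unfold PySem.Set.add
      have hc : PySem.Set.contains (pvPend ks u).keys (pvPar e) = true := by
        have := (PySem.Dict.contains_iff_mem_keys _ _).mp h
        simpa [PySem.Set.contains, List.contains_iff_mem, pvPar] using this
      rw [if_pos hc]
    · have h1 : (pvStep2 (pvPend ks u, []) e).1 = (pvPend ks u).insert (pvParent e.1) [] := by
        unfold pvStep2; simp [h]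
      rw [h1, PySem.Dict.keys_insert_of_not_contains _ _ (by simpa using h)]
      unfold PySem.Set.add
      have hc : ¬ PySem.Set.contains (pvPend ks u).keys (pvPar e) = true := by
        intro hc
        apply h
        rw [PySem.Dict.contains_iff_mem_keys]
        simpa [PySem.Set.contains, List.contains_iff_mem, pvPar] using hc
      rw [if_neg hc]
      rfl

theorem pvPend_contains (ks : List String) (u : List (String × String × String)) (q : String) :
    (pvPend ks u).contains q = true ↔ q ∈ ks ∨ q ∈ u.map pvPar := by
  rw [PySem.Dict.contains_iff_mem_keys, pvPend_keys, set_mem_update, PySem.Set.mem_ofList]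

theorem set_nodup_update (l : List String) :
    ∀ s : PySem.Set String, s.Nodup → (PySem.Set.update s l).Nodup := by
  induction l with
  | nil => intro s hs; rw [PySem.Set.update_nil]; exact hs
  | cons x xs ih =>
    intro s hs
    rw [PySem.Set.update_cons]
    apply ih
    unfold PySem.Set.add
    by_cases h : PySem.Set.contains s x = true
    · rw [if_pos h]; exact hs
    · rw [if_neg h]
      have hx : x ∉ s := by
        intro hm
        exact h (by simpa [PySem.Set.contains, List.contains_iff_mem] using hm)
      simp [List.nodup_append, hs]
      exact fun a ha hax => hx (hax ▸ ha)

theorem pvPend_keys_nodup (ks : List String) (u : List (String × String × String)) :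
    (pvPend ks u).keys.Nodup := by
  rw [pvPend_keys]
  exact set_nodup_update _ _ (PySem.Set.nodup_ofList ks)

theorem pvPend_getD (ks : List String) (u : List (String × String × String)) (q : String) :
    (pvPend ks u).getD q []
      = if q ∈ ks then (u.filter (fun y => pvPar y == q)).reverse
        else ((u.filter (fun y => pvPar y == q)).tail).reverse := by
  induction u using List.reverseRecOn with
  | nil =>
    show (pvDict0 ks).getD q [] = _
    rw [pvDict0_getD]
    split_ifs <;> simp
  | append_singleton u e ih =>
    rw [pvPend_append]
    by_cases h : (pvPend ks u).contains (pvParent e.1) = true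
    · have h1 : (pvStep2 (pvPend ks u, []) e).1
          = (pvPend ks u).modify (pvParent e.1) [] (fun g => PySem.List.insert g 0 e) := by
        unfold pvStep2; simp [h]
      rw [h1, PySem.Dict.getD_modify]
      by_cases hq : q = pvParent e.1
      · rw [if_pos hq, ← hq, ih, pvInsert0]
        have hbq : (pvPar e == q) = true := by
          have : pvPar e = q := by rw [hq]; rfl
          simp [this]
        have hfa : (u ++ [e]).filter (fun y => pvPar y == q)
            = u.filter (fun y => pvPar y == q) ++ [e] := by
          simp [List.filter_append, hbq]
        rw [hfa]
        by_cases hks : q ∈ ks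
        · rw [if_pos hks, if_pos hks]
          simp
        · rw [if_neg hks, if_neg hks]
          have hmem : q ∈ u.map pvPar := by
            rcases (pvPend_contains ks u q).mp (by rw [hq]; exact h) with h' | h'
            · exact absurd h' hks
            · exact h'
          obtain ⟨y, hy, hyq⟩ := List.mem_map.mp hmem
          have hne : u.filter (fun y => pvPar y == q) ≠ [] := by
            intro hnil
            have : y ∈ u.filter (fun y => pvPar y == q) := by
              rw [List.mem_filter]; exact ⟨hy, by simp [hyq]⟩
            rw [hnil] at this
            exact List.not_mem_nil this
          cases hg : u.filter (fun y => pvPar y == q) with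
          | nil => exact absurd hg hne
          | cons g0 gt => simp
      · rw [if_neg hq, ih]
        have hfa : (u ++ [e]).filter (fun y => pvPar y == q)
            = u.filter (fun y => pvPar y == q) := by
          have : (pvPar e == q) = false :=
            beq_eq_false_iff_ne.mpr (fun hh => hq (by rw [← hh]; rfl))
          simp [List.filter_append, this]
        rw [hfa]
    · have h1 : (pvStep2 (pvPend ks u, []) e).1 = (pvPend ks u).insert (pvParent e.1) [] := by
        unfold pvStep2; simp [h]
      rw [h1, PySem.Dict.getD_insert]
      by_cases hq : q = pvParent e.1
      · rw [if_pos hq]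
        have hks : q ∉ ks := fun hk => h (by rw [← hq]; exact (pvPend_contains ks u q).mpr (Or.inl hk))
        have hu : q ∉ u.map pvPar := fun hk => h (by rw [← hq]; exact (pvPend_contains ks u q).mpr (Or.inr hk))
        have hfe : u.filter (fun y => pvPar y == q) = [] := by
          apply List.filter_eq_nil_iff.mpr
          intro y hy hb
          exact hu (List.mem_map.mpr ⟨y, hy, eq_of_beq hb⟩)
        have hbq : (pvPar e == q) = true := by
          have : pvPar e = q := by rw [hq]; rfl
          simp [this]
        have hfa : (u ++ [e]).filter (fun y => pvPar y == q) = [e] := by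
          simp [List.filter_append, hfe, hbq]
        rw [if_neg hks, hfa]
        simp
      · rw [if_neg hq, ih]
        have hfa : (u ++ [e]).filter (fun y => pvPar y == q)
            = u.filter (fun y => pvPar y == q) := by
          have : (pvPar e == q) = false :=
            beq_eq_false_iff_ne.mpr (fun hh => hq (by rw [← hh]; rfl))
          simp [List.filter_append, this]
        rw [hfa]

theorem setOfList_filter (l : List String) (qf : String → Bool) :
    PySem.Set.ofList (l.filter qf) = (PySem.Set.ofList l).filter qf := by
  induction l using List.reverseRecOn with
  | nil => rfl
  | append_singleton l a ih =>
    have hR : PySem.Set.ofList (l ++ [a]) = PySem.Set.add (PySem.Set.ofList l) a := by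
      rw [PySem.Set.ofList_append, PySem.Set.update_cons, PySem.Set.update_nil]
    by_cases hqa : qf a = true
    · have hL : (l ++ [a]).filter qf = l.filter qf ++ [a] := by
        simp [List.filter_append, hqa]
      have hL2 : PySem.Set.ofList (l.filter qf ++ [a])
          = PySem.Set.add (PySem.Set.ofList (l.filter qf)) a := by
        rw [PySem.Set.ofList_append, PySem.Set.update_cons, PySem.Set.update_nil]
      rw [hL, hR, hL2, ih]
      unfold PySem.Set.add
      by_cases hc : (PySem.Set.ofList l).contains a = true
      · have hc' : PySem.Set.contains ((PySem.Set.ofList l).filter qf) a = true := by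
          simp only [PySem.Set.contains, List.contains_iff_mem, List.mem_filter] at hc ⊢
          exact ⟨hc, hqa⟩
        rw [if_pos hc, if_pos hc']
      · have hc' : ¬ PySem.Set.contains ((PySem.Set.ofList l).filter qf) a = true := by
          simp only [PySem.Set.contains, List.contains_iff_mem, List.mem_filter] at hc ⊢
          exact fun h => hc h.1
        rw [if_neg hc, if_neg hc', List.filter_append]
        simp [hqa]
    · have hL : (l ++ [a]).filter qf = l.filter qf := by
        simp [List.filter_append, hqa]
      rw [hL, hR, ih]
      unfold PySem.Set.add
      by_cases hc : (PySem.Set.ofList l).contains a = true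
      · rw [if_pos hc]
      · rw [if_neg hc, List.filter_append]
        simp [hqa]

theorem set_update_filter (s : PySem.Set String) (l : List String) (qf : String → Bool) :
    (PySem.Set.update s l).filter qf = PySem.Set.update (s.filter qf) (l.filter qf) := by
  rw [PySem.Set.update_eq_append_filter, PySem.Set.update_eq_append_filter, List.filter_append,
      setOfList_filter, List.filter_filter, List.filter_filter]
  congr 1
  apply List.filter_congr
  intro y _
  by_cases hqy : qf y = true
  · simp only [hqy, Bool.and_true, Bool.true_and]
    have : PySem.Set.contains (s.filter qf) y = PySem.Set.contains s y := by
      simp only [PySem.Set.contains, List.contains_iff_mem, List.mem_filter]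
      by_cases hm : y ∈ s
      · simp [hm, hqy]
      · simp [hm]
    rw [this]
  · simp [hqy]

theorem pvPend_erase (ks : List String) (u : List (String × String × String)) (p : String) :
    (pvPend ks u).erase p
      = pvPend (ks.filter (fun a => !(a == p))) (u.filter (fun y => !(pvPar y == p))) := by
  apply PySem.Dict.ext
  have h1 := PySem.Dict.items_eq_map_keys (pvPend ks u) (pvPend_keys_nodup ks u) []
  have h2 := PySem.Dict.items_eq_map_keys
    (pvPend (ks.filter (fun a => !(a == p))) (u.filter (fun y => !(pvPar y == p))))
    (pvPend_keys_nodup _ _) []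
  show ((pvPend ks u).items.filter (fun pr => !(pr.1 == p))) = _
  rw [h1, h2, List.filter_map]
  rw [pvPend_keys, pvPend_keys]
  have hks : PySem.Set.ofList (ks.filter (fun a => !(a == p)))
      = (PySem.Set.ofList ks).filter (fun a => !(a == p)) := setOfList_filter _ _
  have hmapf : (u.filter (fun y => !(pvPar y == p))).map pvPar
      = (u.map pvPar).filter (fun a => !(a == p)) := by
    rw [List.filter_map, Function.comp_def]
  rw [hks, hmapf, ← set_update_filter]
  have hcomp : ((fun (pr : String × List (String × String × String)) => !(pr.1 == p)) ∘
      (fun k => (k, (pvPend ks u).getD k []))) = (fun a => !(a == p)) := by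
    funext k; rfl
  rw [hcomp]
  apply List.map_congr_left
  intro k hk
  have hkne : k ≠ p := by
    have := List.mem_filter.mp hk
    simpa using this.2
  congr 1
  rw [pvPend_getD, pvPend_getD]
  have hmem : k ∈ ks.filter (fun a => !(a == p)) ↔ k ∈ ks := by
    simp [List.mem_filter, beq_eq_false_iff_ne.mpr hkne]
  have hflt : (u.filter (fun y => !(pvPar y == p))).filter (fun y => pvPar y == k)
      = u.filter (fun y => pvPar y == k) := by
    rw [List.filter_filter]
    apply List.filter_congr
    intro y _
    by_cases hyk : pvPar y = k
    · simp [hyk, hkne]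
    · simp [beq_eq_false_iff_ne.mpr hyk]
  rw [hflt]
  by_cases hkk : k ∈ ks
  · rw [if_pos hkk, if_pos (hmem.mpr hkk)]
  · rw [if_neg hkk, if_neg (fun hh => hkk (hmem.mp hh))]

theorem pvPend_get? (ks : List String) (u : List (String × String × String)) (q : String) :
    (pvPend ks u).get? q =
      if q ∈ ks ∨ q ∈ u.map pvPar then some ((pvPend ks u).getD q []) else none := by
  by_cases hq : q ∈ ks ∨ q ∈ u.map pvPar
  · have hc : (pvPend ks u).contains q = true := (pvPend_contains ks u q).mpr hq
    have hs : ((pvPend ks u).get? q).isSome := by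
      rw [← PySem.Dict.contains_eq_isSome_get?]; exact hc
    obtain ⟨v, hv⟩ := Option.isSome_iff_exists.mp hs
    rw [if_pos hq, hv, PySem.Dict.getD_eq_get?_getD, hv]
    rfl
  · rw [if_neg hq]
    rw [PySem.Dict.get?_eq_none_iff_not_mem_keys, pvPend_keys, set_mem_update,
        PySem.Set.mem_ofList]
    exact hq

theorem pvHeads_append (L : List (String × String × String)) (e : String × String × String) :
    pvHeads (L ++ [e]) = pvHeads L ++ (if pvPar e ∈ L.map pvPar then [] else [e]) := by
  induction hn : L.length using Nat.strong_induction_on generalizing L with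
  | _ n ih =>
  match L with
  | [] => simp [pvHeads_nil, pvHeads_cons]
  | d :: dt =>
    rw [List.cons_append, pvHeads_cons, pvHeads_cons]
    by_cases hpe : pvPar e = pvPar d
    · have hfa : (dt ++ [e]).filter (fun y => !(pvPar y == pvPar d))
          = dt.filter (fun y => !(pvPar y == pvPar d)) := by
        simp [List.filter_append, hpe]
      rw [hfa]
      have : pvPar e ∈ (d :: dt).map pvPar := by simp [hpe]
      rw [if_pos this, List.append_nil]
    · have hfa : (dt ++ [e]).filter (fun y => !(pvPar y == pvPar d))
          = dt.filter (fun y => !(pvPar y == pvPar d)) ++ [e] := by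
        simp [List.filter_append, beq_eq_false_iff_ne.mpr hpe]
      rw [hfa, ih (dt.filter (fun y => !(pvPar y == pvPar d))).length
        (by subst hn; exact Nat.lt_succ_of_le (List.length_filter_le _ _)) _ rfl]
      have hmem : (pvPar e ∈ (dt.filter (fun y => !(pvPar y == pvPar d))).map pvPar)
          ↔ (pvPar e ∈ (d :: dt).map pvPar) := by
        constructor
        · intro h
          obtain ⟨y, hy, hyq⟩ := List.mem_map.mp h
          exact List.mem_map.mpr ⟨y, List.mem_cons_of_mem _ (List.mem_filter.mp hy).1, hyq⟩
        · intro h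
          rcases List.mem_map.mp h with ⟨y, hy, hyq⟩
          rcases List.mem_cons.mp hy with h' | h'
          · exact absurd (h' ▸ hyq).symm hpe
          · refine List.mem_map.mpr ⟨y, List.mem_filter.mpr ⟨h', ?_⟩, hyq⟩
            simp only [Bool.not_eq_true']
            exact beq_eq_false_iff_ne.mpr (fun hh => hpe (hyq ▸ hh))
      by_cases hm : pvPar e ∈ (d :: dt).map pvPar
      · rw [if_pos hm, if_pos (hmem.mpr hm)]
        simp
      · rw [if_neg hm, if_neg (fun hh => hm (hmem.mp hh))]
        simp

theorem pvTail2_char (ks : List String) (u : List (String × String × String)) :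
    pvTail2 ks u = pvHeads (u.filter (fun y => !(ks.contains (pvPar y)))) := by
  induction u using List.reverseRecOn with
  | nil => simp [pvTail2, pvHeads_nil]
  | append_singleton u e ih =>
    rw [pvTail2_append, ih, List.filter_append]
    by_cases hks : pvPar e ∈ ks
    · have hc : (pvPend ks u).contains (pvParent e.1) = true :=
        (pvPend_contains ks u _).mpr (Or.inl hks)
      have hkc : (ks.contains (pvPar e)) = true := by
        simpa [List.contains_iff_mem] using hks
      have hfe : List.filter (fun y => !(ks.contains (pvPar y))) [e] = [] := by
        simp only [List.filter_cons, List.filter_nil, hkc, Bool.not_true, Bool.false_eq_true,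
          if_false]
      rw [if_pos hc, hfe]
      simp
    · have hkc : (ks.contains (pvPar e)) = false := by
        simpa [List.contains_iff_mem] using hks
      have hfe : List.filter (fun y => !(ks.contains (pvPar y))) [e] = [e] := by
        simp only [List.filter_cons, List.filter_nil, hkc, Bool.not_false, if_true]
      rw [hfe, pvHeads_append]
      by_cases hu : pvPar e ∈ u.map pvPar
      · have hc : (pvPend ks u).contains (pvParent e.1) = true :=
          (pvPend_contains ks u _).mpr (Or.inr hu)
        have hm : pvPar e ∈ (u.filter (fun y => !(ks.contains (pvPar y)))).map pvPar := by
          obtain ⟨y, hy, hyq⟩ := List.mem_map.mp hu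
          refine List.mem_map.mpr ⟨y, List.mem_filter.mpr ⟨hy, ?_⟩, hyq⟩
          rw [hyq]
          simp only [hkc, Bool.not_false]
        rw [if_pos hc, if_pos hm]
      · have hc : ¬ (pvPend ks u).contains (pvParent e.1) = true := by
          intro hc
          rcases (pvPend_contains ks u _).mp hc with h' | h'
          · exact hks h'
          · exact hu h'
        have hm : pvPar e ∉ (u.filter (fun y => !(ks.contains (pvPar y)))).map pvPar := by
          intro hmm
          obtain ⟨y, hy, hyq⟩ := List.mem_map.mp hmm
          exact hu (List.mem_map.mpr ⟨y, (List.mem_filter.mp hy).1, hyq⟩)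
        rw [if_neg hc, if_neg hm]

theorem pvEmit_tail (done : List (String × String × String)) :
    ∀ (ks : List String) (out : List (String × String × String)),
      (∀ y ∈ done, pvPar y ∉ ks) →
      ((pvHeads done).foldl (fun acc item => pvStep3 acc item) (out, pvPend ks done)).1
        = out ++ pvUnanch done := by
  induction hn : done.length using Nat.strong_induction_on generalizing done with
  | _ n ih =>
  match done with
  | [] =>
    intro ks out _
    rw [pvHeads_nil, pvUnanch_nil]
    simp
  | d :: dt =>
    intro ks out hks
    rw [pvHeads_cons, pvUnanch_cons]
    simp only [List.foldl_cons]
    have hcon : (pvPend ks (d :: dt)).contains (pvParent d.1) = true := by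
      apply (pvPend_contains _ _ _).mpr
      right
      exact List.mem_map.mpr ⟨d, by simp, rfl⟩
    have hget : (pvPend ks (d :: dt)).get? (pvParent d.1)
        = some ((dt.filter (fun y => pvPar y == pvPar d)).reverse) := by
      rw [pvPend_get?]
      rw [if_pos (show pvParent d.1 ∈ ks ∨ pvParent d.1 ∈ (d :: dt).map pvPar from
        Or.inr (List.mem_map.mpr ⟨d, by simp, rfl⟩))]
      congr 1
      rw [pvPend_getD]
      have hnk : pvParent d.1 ∉ ks := hks d (by simp)
      rw [if_neg hnk]
      have : (d :: dt).filter (fun y => pvPar y == pvParent d.1)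
          = d :: dt.filter (fun y => pvPar y == pvPar d) := by
        simp only [List.filter_cons]
        have : (pvPar d == pvParent d.1) = true := by simp [pvPar]
        rw [this]
        simp [pvPar]
      rw [this]
      simp
    have hstep : pvStep3 (out, pvPend ks (d :: dt)) d
        = (out ++ d :: (dt.filter (fun y => pvPar y == pvPar d)).reverse,
           (pvPend ks (d :: dt)).erase (pvParent d.1)) := by
      unfold pvStep3
      rw [PySem.Dict.pop?, hget]
      rfl
    rw [hstep]
    have herase : (pvPend ks (d :: dt)).erase (pvParent d.1)
        = pvPend (ks.filter (fun a => !(a == pvParent d.1)))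
            (dt.filter (fun y => !(pvPar y == pvPar d))) := by
      rw [pvPend_erase]
      congr 1
      simp only [List.filter_cons]
      have : (!(pvPar d == pvParent d.1)) = false := by simp [pvPar]
      rw [this]
      simp [pvPar]
    rw [herase]
    have hrec := ih (dt.filter (fun y => !(pvPar y == pvPar d))).length
      (by subst hn; exact Nat.lt_succ_of_le (List.length_filter_le _ _)) _ rfl
      (ks.filter (fun a => !(a == pvParent d.1)))
      (out ++ d :: (dt.filter (fun y => pvPar y == pvPar d)).reverse)
      (by
        intro y hy hmem
        exact hks y (List.mem_cons_of_mem _ (List.mem_filter.mp hy).1)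
          ((List.mem_filter.mp hmem).1))
    rw [hrec]
    simp

theorem pvEmit_en : ∀ (en : List (String × String × String)) (ks : List String)
    (done out T : List (String × String × String)),
    (∀ x ∈ en, pvPar x ∈ ks ∨ done.filter (fun y => pvPar y == pvPar x) = []) →
    (∀ q ∈ ks, ∃ x ∈ en, pvPar x = q) →
    T = pvHeads (done.filter (fun y => !((en.map pvPar).contains (pvPar y)))) →
    ((en ++ T).foldl (fun acc item => pvStep3 acc item) (out, pvPend ks done)).1
      = out ++ pvCore en done := by
  intro en
  induction en with
  | nil =>
    intro ks done out T hcov hks hT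
    have hall : ∀ y ∈ done, pvPar y ∉ ks := by
      intro y _ hm
      obtain ⟨x, hx, _⟩ := hks _ hm
      exact absurd hx (List.not_mem_nil)
    have hTd : T = pvHeads done := by
      rw [hT]
      congr 1
      apply List.filter_eq_self.mpr
      intro y _
      simp
    rw [List.nil_append, hTd]
    exact pvEmit_tail done ks out hall
  | cons x r ih =>
    intro ks done out T hcov hks hT
    simp only [List.cons_append, List.foldl_cons]
    rw [pvCore]
    by_cases hpk : pvPar x ∈ ks
    · -- the anchor's group is pending under its parent key
      have hget : (pvPend ks done).get? (pvParent x.1)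
          = some ((done.filter (fun y => pvPar y == pvPar x)).reverse) := by
        rw [pvPend_get?]
        rw [if_pos (show pvParent x.1 ∈ ks ∨ pvParent x.1 ∈ done.map pvPar from Or.inl hpk)]
        congr 1
        rw [pvPend_getD, if_pos (show pvParent x.1 ∈ ks from hpk)]
        rfl
      have hstep : pvStep3 (out, pvPend ks done) x
          = (out ++ x :: (done.filter (fun y => pvPar y == pvPar x)).reverse,
             (pvPend ks done).erase (pvParent x.1)) := by
        unfold pvStep3
        rw [PySem.Dict.pop?, hget]
        rfl
      rw [hstep, pvPend_erase]
      have hrec := ih (ks.filter (fun a => !(a == pvParent x.1)))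
        (done.filter (fun y => !(pvPar y == pvParent x.1)))
        (out ++ x :: (done.filter (fun y => pvPar y == pvPar x)).reverse) T ?_ ?_ ?_
      · rw [hrec]
        simp only [List.append_assoc, List.cons_append]
        rfl
      · -- hcov for r
        intro q hq
        by_cases hqx : pvPar q = pvPar x
        · right
          rw [List.filter_filter]
          apply List.filter_eq_nil_iff.mpr
          intro y _ hb
          rw [Bool.and_eq_true] at hb
          rw [hqx] at hb
          rcases hb with ⟨hb1, hb2⟩
          rw [eq_of_beq hb1] at hb2
          simp at hb2
          exact hb2 rfl
        · rcases hcov q (List.mem_cons_of_mem _ hq) with h' | h'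
          · left
            rw [List.mem_filter]
            refine ⟨h', ?_⟩
            have : (pvPar q == pvParent x.1) = false :=
              beq_eq_false_iff_ne.mpr (fun hh => hqx hh)
            simp [this]
          · right
            rw [List.filter_filter]
            apply List.filter_eq_nil_iff.mpr
            intro y hy hb
            rw [Bool.and_eq_true] at hb
            have : y ∈ done.filter (fun y => pvPar y == pvPar q) :=
              List.mem_filter.mpr ⟨hy, hb.1⟩
            rw [h'] at this
            exact List.not_mem_nil this
      · -- hks for r
        intro q hq
        have hq1 := (List.mem_filter.mp hq).1
        have hq2 : q ≠ pvParent x.1 := by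
          have := (List.mem_filter.mp hq).2
          simpa using this
        obtain ⟨x', hx', hpx'⟩ := hks q hq1
        rcases List.mem_cons.mp hx' with h' | h'
        · exfalso
          apply hq2
          rw [← hpx', h']
          rfl
        · exact ⟨x', h', hpx'⟩
      · -- hT for r
        rw [hT]
        congr 1
        rw [List.filter_filter]
        apply List.filter_congr
        intro y _
        simp only [List.map_cons, List.contains_cons]
        by_cases hyx : pvPar y = pvPar x
        · have h1 : (pvPar y == pvPar x) = true := by simp [hyx]
          have h2 : (pvPar y == pvParent x.1) = true := h1
          simp [h1, h2]
        · have h1 : (pvPar y == pvPar x) = false := beq_eq_false_iff_ne.mpr hyx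
          have h2 : (pvPar y == pvParent x.1) = false := h1
          simp [h1, h2]
    · -- parent not among the anchors: its group must be empty
      have hfe : done.filter (fun y => pvPar y == pvPar x) = [] := by
        rcases hcov x (by simp) with h' | h'
        · exact absurd h' hpk
        · exact h'
      have hnd : pvPar x ∉ done.map pvPar := by
        intro hm
        obtain ⟨y, hy, hyq⟩ := List.mem_map.mp hm
        have : y ∈ done.filter (fun y => pvPar y == pvPar x) :=
          List.mem_filter.mpr ⟨hy, by simp [hyq]⟩
        rw [hfe] at this
        exact List.not_mem_nil this
      have hget : (pvPend ks done).get? (pvParent x.1) = none := by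
        rw [pvPend_get?, if_neg]
        rintro (h' | h')
        · exact hpk h'
        · exact hnd h'
      have hstep : pvStep3 (out, pvPend ks done) x = (out ++ [x], pvPend ks done) := by
        unfold pvStep3
        rw [PySem.Dict.pop?, hget]
        rfl
      rw [hstep, hfe]
      have hfs : done.filter (fun y => !(pvPar y == pvPar x)) = done := by
        apply List.filter_eq_self.mpr
        intro y hy
        by_cases h : pvPar y = pvPar x
        · exact absurd (List.mem_map.mpr ⟨y, hy, h⟩) hnd
        · simp [beq_eq_false_iff_ne.mpr h]
      rw [hfs]
      have hrec := ih ks done (out ++ [x]) T ?_ ?_ ?_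
      · rw [hrec]
        simp
      · intro q hq
        exact hcov q (List.mem_cons_of_mem _ hq)
      · intro q hq
        obtain ⟨x', hx', hpx'⟩ := hks q hq
        rcases List.mem_cons.mp hx' with h' | h'
        · exfalso
          apply hpk
          have : pvPar x = q := by rw [← h']; exact hpx'
          rw [this]
          exact hq
        · exact ⟨x', h', hpx'⟩
      · rw [hT]
        congr 1
        apply List.filter_congr
        intro y hy
        simp only [List.map_cons, List.contains_cons]
        have : (pvPar y == pvPar x) = false := by
          apply beq_eq_false_iff_ne.mpr
          intro hh
          exact hnd (List.mem_map.mpr ⟨y, hy, hh⟩)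
        rw [this]
        simp

theorem insert_es_into_en_alt_eq_core (en es : List (String × String × String)) :
    insert_es_into_en_alt en es = pvCore en es := by
  have hcov : ∀ x ∈ en, pvPar x ∈ en.map pvPar ∨ es.filter (fun y => pvPar y == pvPar x) = [] :=
    fun x hx => Or.inl (List.mem_map.mpr ⟨x, hx, rfl⟩)
  have hks : ∀ q ∈ en.map pvPar, ∃ x ∈ en, pvPar x = q := by
    intro q hq
    obtain ⟨x, hx, hpx⟩ := List.mem_map.mp hq
    exact ⟨x, hx, hpx⟩
  have key := pvEmit_en en (en.map pvPar) es [] (pvTail2 (en.map pvPar) es) hcov hks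
    (pvTail2_char _ _)
  rw [List.nil_append] at key
  unfold pvPend pvTail2 pvDict0 at key
  rw [List.foldl_map] at key
  exact key

-- ===== VERDICT =====
theorem insert_es_into_en_spec : Claim_equal_insert_es_into_en := by
  intro en es _
  show insert_es_into_en en es = insert_es_into_en_alt en es
  rw [insert_es_into_en_eq_core, insert_es_into_en_alt_eq_core]
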